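-- pv_equiv track=rewrite | github.com/NesP1803/lasAfricanas | backend/apps/core/middleware.py | _get_modelo_slug
-- ===== SOURCE A (Python) =====
-- def _get_modelo_slug(view_name):
--     if not view_name:
--         return ''
--     if ':' in view_name:
--         view_name = view_name.split(':', 1)[1]
--     candidatos = [
--         'configuracion-empresa',
--         'configuracion-facturacion',
--         'orden-taller',
--         'movimiento',
--         'producto',
--         'proveedor',
--         'categoria',
--         'cliente',
--         'venta',
--         'usuario',
--         'mecanico',
--         'moto',
--         'impuesto',
--         'auditoria',
--     ]
--     for candidato in candidatos:
--         if view_name.startswith(f"{candidato}-") or view_name == candidato: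
--             return candidato
--     return view_name.split('-', 1)[0]
-- ===== SOURCE B (Python) =====
-- _DOS_PALABRAS = {'configuracion-empresa', 'configuracion-facturacion', 'orden-taller'}
--
--
-- def _get_modelo_slug(view_name):
--     if not view_name:
--         return ''
--     name = view_name.split(':', 1)[-1]
--     parts = name.split('-')
--     two = '-'.join(parts[:2])
--     if two in _DOS_PALABRAS:
--         return two
--     return parts[0]
-- ===== Notes on version B (the rewrite author's own statement) =====
-- stated objective: simpler
-- what changed: Instead of scanning the 14 candidate slugs testing prefix-or-equality for each, B splits the processed view name at hyphens once, returns the two-segment prefix if it is one of the three hyphenated slugs, and otherwise returns the first segment (which is what A's single-word matches and its fallback both produce).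
import Mathlib
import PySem

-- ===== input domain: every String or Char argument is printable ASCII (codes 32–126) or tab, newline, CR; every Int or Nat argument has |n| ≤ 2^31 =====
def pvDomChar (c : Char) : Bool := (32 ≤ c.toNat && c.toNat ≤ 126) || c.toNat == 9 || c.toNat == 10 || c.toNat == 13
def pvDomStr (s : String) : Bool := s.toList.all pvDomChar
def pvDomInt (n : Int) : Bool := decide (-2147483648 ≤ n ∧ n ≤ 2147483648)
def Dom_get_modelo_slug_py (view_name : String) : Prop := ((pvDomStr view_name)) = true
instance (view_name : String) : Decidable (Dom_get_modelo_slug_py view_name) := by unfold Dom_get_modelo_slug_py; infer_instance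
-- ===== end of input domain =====

-- B replaces A's linear scan over the 14 slug candidates by splitting once on '-' and testing the
-- two-segment prefix against the three hyphenated slugs (simpler: one membership test, no scan).

-- ===== PORT A =====
def pvCandidatos : List String :=
  ["configuracion-empresa", "configuracion-facturacion", "orden-taller",
   "movimiento", "producto", "proveedor", "categoria", "cliente", "venta",
   "usuario", "mecanico", "moto", "impuesto", "auditoria"]

def get_modelo_slug_py (view_name : String) : String :=
  if view_name = "" then ""
  else
    let vn := if PySem.Str.isIn ":" view_name
              then ((PySem.Str.splitMax? view_name ":" 1).getD []).getD 1 ""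
              else view_name
    -- the for-loop with early return, as a scan for the first matching candidate
    match pvCandidatos.find? (fun c => PySem.Str.startswith vn (c ++ "-") || vn == c) with
    | some c => c
    | none => ((PySem.Str.splitMax? vn "-" 1).getD []).getD 0 ""

-- ===== PORT B =====
def pvDosPalabras : List String :=
  ["configuracion-empresa", "configuracion-facturacion", "orden-taller"]

def get_modelo_slug_py_alt (view_name : String) : String :=
  if view_name = "" then ""
  else
    let name := (PySem.List.pyGet? ((PySem.Str.splitMax? view_name ":" 1).getD []) (-1)).getD ""
    let parts := (PySem.Str.split? name "-").getD []
    let two := PySem.Str.join "-" (parts.take 2)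
    if two ∈ pvDosPalabras then two else parts.getD 0 ""

-- ===== PRECONDITION & SPEC =====
def Spec_get_modelo_slug_py (view_name : String) (out : String) : Prop := out = get_modelo_slug_py_alt view_name
instance (view_name : String) (out : String) : Decidable (Spec_get_modelo_slug_py view_name out) := by unfold Spec_get_modelo_slug_py; infer_instance

-- ===== CLAIM (what is proved, stated in full; the proofs are below) =====
def Claim_equal_get_modelo_slug_py : Prop := ∀ (view_name : String), Dom_get_modelo_slug_py view_name → Spec_get_modelo_slug_py view_name (get_modelo_slug_py view_name)

-- ===== LEMMAS AND PROOFS =====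

-- reference versions of Python's  s.split(d)  and  s.split(d, 1)  for a one-character separator
def pvSplitC (d : Char) : List Char → List (List Char)
  | [] => [[]]
  | c :: rest =>
    if c = d then [] :: pvSplitC d rest
    else match pvSplitC d rest with
         | p :: ps => (c :: p) :: ps
         | [] => [[c]]

def pvSplit1 (d : Char) : List Char → List (List Char)
  | [] => [[]]
  | c :: rest =>
    if c = d then [[], rest]
    else match pvSplit1 d rest with
         | p :: ps => (c :: p) :: ps
         | [] => [[c]]

theorem pvSplitC_ne_nil (d : Char) (l : List Char) : pvSplitC d l ≠ [] := by
  cases l with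
  | nil => simp [pvSplitC]
  | cons c rest =>
    simp only [pvSplitC]
    split
    · simp
    · split <;> simp

theorem pvSplit1_ne_nil (d : Char) (l : List Char) : pvSplit1 d l ≠ [] := by
  cases l with
  | nil => simp [pvSplit1]
  | cons c rest =>
    simp only [pvSplit1]
    split
    · simp
    · split <;> simp

-- one step of the PySem splitting loops, for a one-character separator
theorem pvGo_nil (sep : List Char) (f : Nat) (cur : List Char) (acc : List (List Char)) :
    PySem.Chars.splitOn.go sep (f + 1) [] cur acc = (cur.reverse :: acc).reverse := by
  rw [PySem.Chars.splitOn.go]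
  simp

theorem pvGo_cons (d c : Char) (f : Nat) (rest cur : List Char) (acc : List (List Char)) :
    PySem.Chars.splitOn.go [d] (f + 1) (c :: rest) cur acc =
      (if c = d then PySem.Chars.splitOn.go [d] f rest [] (cur.reverse :: acc)
       else PySem.Chars.splitOn.go [d] f rest (c :: cur) acc) := by
  rw [PySem.Chars.splitOn.go]
  by_cases hc : c = d
  · simp [List.isPrefixOf, hc]
  · simp [List.isPrefixOf, hc, Ne.symm hc]

theorem pvGoM_nil (sep : List Char) (f m : Nat) (cur : List Char) (acc : List (List Char)) :
    PySem.Chars.splitOnMax.go sep (f + 1) m [] cur acc = (cur.reverse :: acc).reverse := by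
  rw [PySem.Chars.splitOnMax.go]
  simp

theorem pvGoM_cons (d c : Char) (f m : Nat) (rest cur : List Char) (acc : List (List Char)) :
    PySem.Chars.splitOnMax.go [d] (f + 1) m (c :: rest) cur acc =
      (if m = 0 then ((cur.reverse ++ (c :: rest)) :: acc).reverse
       else if c = d then PySem.Chars.splitOnMax.go [d] f (m - 1) rest [] (cur.reverse :: acc)
       else PySem.Chars.splitOnMax.go [d] f m rest (c :: cur) acc) := by
  rw [PySem.Chars.splitOnMax.go]
  by_cases hm : m = 0
  · simp [hm]
  · by_cases hc : c = d
    · simp [hm, List.isPrefixOf, hc]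
    · simp [hm, List.isPrefixOf, hc, Ne.symm hc]

-- the fuel-and-accumulator loops of PySem compute exactly pvSplitC / pvSplit1
theorem pvSplitOn_go_eq (d : Char) :
    ∀ (fuel : Nat) (l cur : List Char) (acc : List (List Char)), l.length < fuel →
      PySem.Chars.splitOn.go [d] fuel l cur acc =
        acc.reverse ++ (match pvSplitC d l with
          | p :: ps => (cur.reverse ++ p) :: ps
          | [] => [cur.reverse]) := by
  intro fuel
  induction fuel with
  | zero => intro l cur acc h; exact absurd h (Nat.not_lt_zero _)
  | succ n ih =>
    intro l cur acc h
    cases l with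
    | nil => rw [pvGo_nil]; simp [pvSplitC]
    | cons c rest =>
      rw [pvGo_cons]
      have hlen : rest.length < n := by simpa using h
      by_cases hc : c = d
      · rw [if_pos hc, ih rest [] _ hlen]
        cases hsp : pvSplitC d rest with
        | nil => exact absurd hsp (pvSplitC_ne_nil d rest)
        | cons p ps => simp [pvSplitC, hc, hsp]
      · rw [if_neg hc, ih rest (c :: cur) _ hlen]
        cases hsp : pvSplitC d rest with
        | nil => exact absurd hsp (pvSplitC_ne_nil d rest)
        | cons p ps => simp [pvSplitC, hc, hsp]

theorem pvSplitOn_eq (d : Char) (l : List Char) :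
    PySem.Chars.splitOn l [d] = pvSplitC d l := by
  rw [PySem.Chars.splitOn, pvSplitOn_go_eq d (l.length + 1) l [] [] (by omega)]
  cases hsp : pvSplitC d l with
  | nil => exact absurd hsp (pvSplitC_ne_nil d l)
  | cons p ps => simp

theorem pvSplitOnMax_go0 (d : Char) (fuel : Nat) (l : List Char) (acc : List (List Char))
    (h : 0 < fuel) : PySem.Chars.splitOnMax.go [d] fuel 0 l [] acc = acc.reverse ++ [l] := by
  cases fuel with
  | zero => exact absurd h (by omega)
  | succ n =>
    cases l with
    | nil => rw [pvGoM_nil]; simp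
    | cons c rest => rw [pvGoM_cons]; simp

theorem pvSplitOnMax_go_eq (d : Char) :
    ∀ (fuel : Nat) (l cur : List Char) (acc : List (List Char)), l.length < fuel →
      PySem.Chars.splitOnMax.go [d] fuel 1 l cur acc =
        acc.reverse ++ (match pvSplit1 d l with
          | p :: ps => (cur.reverse ++ p) :: ps
          | [] => [cur.reverse]) := by
  intro fuel
  induction fuel with
  | zero => intro l cur acc h; exact absurd h (Nat.not_lt_zero _)
  | succ n ih =>
    intro l cur acc h
    cases l with
    | nil => rw [pvGoM_nil]; simp [pvSplit1]
    | cons c rest =>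
      rw [pvGoM_cons]
      have hlen : rest.length < n := by simpa using h
      by_cases hc : c = d
      · rw [if_neg (by omega), if_pos hc]
        have hn : 0 < n := by omega
        rw [show (1 : Nat) - 1 = 0 from rfl, pvSplitOnMax_go0 d n rest _ hn]
        simp [pvSplit1, hc]
      · rw [if_neg (by omega), if_neg hc, ih rest (c :: cur) _ hlen]
        cases hsp : pvSplit1 d rest with
        | nil => exact absurd hsp (pvSplit1_ne_nil d rest)
        | cons p ps => simp [pvSplit1, hc, hsp]

theorem pvSplitOnMax_eq (d : Char) (l : List Char) :
    PySem.Chars.splitOnMax l [d] 1 = pvSplit1 d l := by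
  rw [PySem.Chars.splitOnMax]
  rw [if_neg (by omega)]
  rw [show ((1 : Int).toNat) = 1 from rfl]
  rw [pvSplitOnMax_go_eq d (l.length + 1) l [] [] (by omega)]
  cases hsp : pvSplit1 d l with
  | nil => exact absurd hsp (pvSplit1_ne_nil d l)
  | cons p ps => simp

-- heads of the two splits agree
theorem pvHead_eq (d : Char) (l : List Char) :
    (pvSplit1 d l).headI = (pvSplitC d l).headI := by
  induction l with
  | nil => rfl
  | cons c rest ih =>
    by_cases hc : c = d
    · simp [pvSplit1, pvSplitC, hc]
    · cases h1 : pvSplit1 d rest with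
      | nil => exact absurd h1 (pvSplit1_ne_nil d rest)
      | cons p psx =>
        cases h2 : pvSplitC d rest with
        | nil => exact absurd h2 (pvSplitC_ne_nil d rest)
        | cons q qs =>
          rw [h1, h2] at ih
          simp only [List.headI] at ih
          simp [pvSplit1, pvSplitC, hc, h1, h2, ih]

-- behaviour when the separator does not occur
theorem pvSplitC_not_mem (d : Char) (l : List Char) (h : d ∉ l) : pvSplitC d l = [l] := by
  induction l with
  | nil => rfl
  | cons c rest ih =>
    have hc : ¬ c = d := fun hcd => h (by simp [hcd])
    have hrest : d ∉ rest := fun hm => h (by simp [hm])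
    simp [pvSplitC, hc, ih hrest]

theorem pvSplit1_not_mem (d : Char) (l : List Char) (h : d ∉ l) : pvSplit1 d l = [l] := by
  induction l with
  | nil => rfl
  | cons c rest ih =>
    have hc : ¬ c = d := fun hcd => h (by simp [hcd])
    have hrest : d ∉ rest := fun hm => h (by simp [hm])
    simp [pvSplit1, hc, ih hrest]

theorem pvSplitC_singleton (d : Char) (l p : List Char) (h : pvSplitC d l = [p]) : l = p := by
  induction l generalizing p with
  | nil => simpa [pvSplitC] using h.symm
  | cons c rest ih =>
    by_cases hc : c = d
    · rw [pvSplitC, if_pos hc] at h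
      cases hsp : pvSplitC d rest with
      | nil => exact absurd hsp (pvSplitC_ne_nil d rest)
      | cons q qs => rw [hsp] at h; simp at h
    · rw [pvSplitC, if_neg hc] at h
      cases hsp : pvSplitC d rest with
      | nil => exact absurd hsp (pvSplitC_ne_nil d rest)
      | cons q qs =>
        rw [hsp] at h
        simp only [List.cons.injEq] at h
        obtain ⟨h1, h2⟩ := h
        have : rest = q := ih q (by rw [hsp, h2])
        rw [← h1, this]

theorem pvSplitC_mem (d : Char) (l : List Char) (h : d ∈ l) :
    ∃ a b bs, pvSplitC d l = a :: b :: bs := by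
  induction l with
  | nil => simp at h
  | cons c rest ih =>
    by_cases hc : c = d
    · cases hsp : pvSplitC d rest with
      | nil => exact absurd hsp (pvSplitC_ne_nil d rest)
      | cons q qs => exact ⟨[], q, qs, by simp [pvSplitC, hc, hsp]⟩
    · have hm : d ∈ rest := by
        rcases List.mem_cons.mp h with h' | h'
        · exact absurd h'.symm hc
        · exact h'
      obtain ⟨a, b, bs, hab⟩ := ih hm
      exact ⟨c :: a, b, bs, by simp [pvSplitC, hc, hab]⟩

-- splitting a list that starts with a separator-free block
theorem pvSplitC_append (d : Char) (a r : List Char) (ha : d ∉ a) :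
    pvSplitC d (a ++ d :: r) = a :: pvSplitC d r := by
  induction a with
  | nil => simp [pvSplitC]
  | cons a0 a' ih =>
    have h0 : ¬ a0 = d := fun h => ha (by simp [h])
    have ha' : d ∉ a' := fun h => ha (by simp [h])
    simp [pvSplitC, h0, ih ha']

theorem pvSplit1_mem (d : Char) (l : List Char) (h : d ∈ l) :
    ∃ a b, l = a ++ d :: b ∧ pvSplit1 d l = [a, b] := by
  induction l with
  | nil => simp at h
  | cons c rest ih =>
    by_cases hc : c = d
    · exact ⟨[], rest, by simp [hc], by simp [pvSplit1, hc]⟩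
    · have hm : d ∈ rest := by
        rcases List.mem_cons.mp h with h' | h'
        · exact absurd h'.symm hc
        · exact h'
      obtain ⟨a, b, hl, hsp⟩ := ih hm
      exact ⟨c :: a, b, by simp [hl], by simp [pvSplit1, hc, hsp]⟩

-- inversion: a two-or-more-part split comes from a leading separator-free block
theorem pvSplitC_cons_cons (d : Char) (t p0 p1 : List Char) (ps : List (List Char))
    (h : pvSplitC d t = p0 :: p1 :: ps) :
    ∃ r, t = p0 ++ d :: r ∧ pvSplitC d r = p1 :: ps ∧ d ∉ p0 := by
  induction t generalizing p0 with
  | nil => simp [pvSplitC] at h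
  | cons c rest ih =>
    by_cases hc : c = d
    · rw [pvSplitC, if_pos hc] at h
      simp only [List.cons.injEq] at h
      obtain ⟨h1, h2⟩ := h
      exact ⟨rest, by simp [hc, ← h1], h2, by simp [← h1]⟩
    · rw [pvSplitC, if_neg hc] at h
      cases hsp : pvSplitC d rest with
      | nil => exact absurd hsp (pvSplitC_ne_nil d rest)
      | cons q qs =>
        rw [hsp] at h
        simp only [List.cons.injEq] at h
        obtain ⟨h1, h2⟩ := h
        obtain ⟨r, htr, hcr, hnq⟩ := ih q (by rw [hsp, h2])
        refine ⟨r, by simp [htr, ← h1], hcr, ?_⟩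
        rw [← h1]
        simp only [List.mem_cons, not_or]
        exact ⟨fun hd => hc hd.symm, hnq⟩

-- a block-free decomposition around the first separator is unique
theorem pvNoSep_unique (d : Char) (a x b y : List Char) (ha : d ∉ a) (hx : d ∉ x)
    (h : a ++ d :: b = x ++ d :: y) : a = x ∧ b = y := by
  induction a generalizing x with
  | nil =>
    cases x with
    | nil => simpa using h
    | cons x0 x' =>
      rw [List.nil_append, List.cons_append] at h
      injection h with h1 _
      exact absurd (by simp [h1]) hx
  | cons a0 a' ih =>
    cases x with
    | nil =>
      rw [List.nil_append, List.cons_append] at h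
      injection h with h1 _
      exact absurd (by simp [← h1]) ha
    | cons x0 x' =>
      rw [List.cons_append, List.cons_append] at h
      injection h with h1 h2
      have ha' : d ∉ a' := fun hm => ha (by simp [hm])
      have hx' : d ∉ x' := fun hm => hx (by simp [hm])
      obtain ⟨e1, e2⟩ := ih x' ha' hx' h2
      exact ⟨by rw [h1, e1], e2⟩

-- candidate predicate characterisations (t splits into at least two parts)
theorem pvPred_two (t p0 p1 : List Char) (ps : List (List Char)) (x y : List Char)
    (hx : '-' ∉ x) (hy : '-' ∉ y) (h : pvSplitC '-' t = p0 :: p1 :: ps) :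
    (PySem.Chars.startswith t ((x ++ '-' :: y) ++ ['-']) || decide (t = x ++ '-' :: y)) = true
      ↔ p0 = x ∧ p1 = y := by
  constructor
  · intro hp
    simp only [Bool.or_eq_true, decide_eq_true_eq] at hp
    rcases hp with hsw | heq
    · rw [PySem.Chars.startswith_iff] at hsw
      obtain ⟨z, hz⟩ := hsw
      have ht : t = x ++ '-' :: (y ++ '-' :: z) := by rw [← hz]; simp
      rw [ht, pvSplitC_append '-' x _ hx, pvSplitC_append '-' y _ hy] at h
      simp only [List.cons.injEq] at h
      exact ⟨h.1.symm, h.2.1.symm⟩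
    · rw [heq, pvSplitC_append '-' x _ hx, pvSplitC_not_mem '-' y hy] at h
      simp only [List.cons.injEq] at h
      exact ⟨h.1.symm, h.2.1.symm⟩
  · rintro ⟨rfl, rfl⟩
    obtain ⟨r, htr, hcr, hnp⟩ := pvSplitC_cons_cons '-' t p0 p1 ps h
    cases ps with
    | nil =>
      have hry : r = p1 := pvSplitC_singleton '-' r p1 hcr
      simp only [Bool.or_eq_true, decide_eq_true_eq]
      right
      rw [htr, hry]
    | cons q qs =>
      obtain ⟨r2, htr2, _, _⟩ := pvSplitC_cons_cons '-' r p1 q qs hcr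
      simp only [Bool.or_eq_true]
      left
      rw [PySem.Chars.startswith_iff]
      exact ⟨r2, by rw [htr, htr2]; simp⟩

theorem pvPred_one (t p0 p1 : List Char) (ps : List (List Char)) (c : List Char)
    (hc : '-' ∉ c) (h : pvSplitC '-' t = p0 :: p1 :: ps) :
    (PySem.Chars.startswith t (c ++ ['-']) || decide (t = c)) = true ↔ p0 = c := by
  constructor
  · intro hp
    simp only [Bool.or_eq_true, decide_eq_true_eq] at hp
    rcases hp with hsw | heq
    · rw [PySem.Chars.startswith_iff] at hsw
      obtain ⟨z, hz⟩ := hsw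
      have ht : t = c ++ '-' :: z := by rw [← hz]; simp
      rw [ht, pvSplitC_append '-' c _ hc] at h
      simp only [List.cons.injEq] at h
      exact h.1.symm
    · obtain ⟨r, htr, _, hnp⟩ := pvSplitC_cons_cons '-' t p0 p1 ps h
      rw [heq] at htr
      exact absurd (by rw [htr]; simp) hc
  · rintro rfl
    obtain ⟨r, htr, _, _⟩ := pvSplitC_cons_cons '-' t p0 p1 ps h
    simp only [Bool.or_eq_true]
    left
    rw [PySem.Chars.startswith_iff]
    exact ⟨r, by rw [htr]; simp⟩

theorem pvOfList_eq_iff (l : List Char) (c : String) : String.ofList l = c ↔ l = c.toList := by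
  constructor
  · intro h; rw [← h, String.toList_ofList]
  · intro h; rw [h, String.ofList_toList]

-- the two colon-handling expressions agree
theorem pvColon_eq (s : String) :
    (if PySem.Str.isIn ":" s then ((PySem.Str.splitMax? s ":" 1).getD []).getD 1 "" else s)
    = (PySem.List.pyGet? ((PySem.Str.splitMax? s ":" 1).getD []) (-1)).getD "" := by
  have hcolon : (":".toList : List Char) = [':'] := by decide
  have hsplit : (PySem.Str.splitMax? s ":" 1).getD [] =
      (pvSplit1 ':' s.toList).map String.ofList := by
    rw [PySem.Str.splitMax?.eq_1, hcolon, PySem.Chars.splitMax?.eq_1]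
    simp [pvSplitOnMax_eq]
  have hiff : PySem.Str.isIn ":" s = true ↔ ':' ∈ s.toList := by
    rw [PySem.Str.isIn_iff_infix, hcolon, List.singleton_infix_iff]
  by_cases hm : ':' ∈ s.toList
  · obtain ⟨a, b, _, hsp⟩ := pvSplit1_mem ':' s.toList hm
    rw [if_pos (hiff.mpr hm), hsplit, hsp]
    simp [PySem.List.pyGet?, PySem.List.pyIdx?]
  · have : ¬ (PySem.Str.isIn ":" s = true) := fun h => hm (hiff.mp h)
    rw [if_neg this, hsplit, pvSplit1_not_mem ':' s.toList hm]
    simp [PySem.List.pyGet?, PySem.List.pyIdx?, String.ofList_toList]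

-- the candidate scan equals the split-once-and-look-up computation
theorem pvCore_eq (vn : String) :
    (match pvCandidatos.find? (fun c => PySem.Str.startswith vn (c ++ "-") || vn == c) with
     | some c => c
     | none => ((PySem.Str.splitMax? vn "-" 1).getD []).getD 0 "")
    = (if PySem.Str.join "-" (((PySem.Str.split? vn "-").getD []).take 2) ∈ pvDosPalabras
       then PySem.Str.join "-" (((PySem.Str.split? vn "-").getD []).take 2)
       else ((PySem.Str.split? vn "-").getD []).getD 0 "") := by
  have hdash : ("-".toList : List Char) = ['-'] := by decide
  have hsplitC : (PySem.Str.split? vn "-").getD [] =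
      (pvSplitC '-' vn.toList).map String.ofList := by
    rw [PySem.Str.split?.eq_1, hdash, PySem.Chars.split?.eq_1]
    simp [pvSplitOn_eq]
  have hsplit1 : (PySem.Str.splitMax? vn "-" 1).getD [] =
      (pvSplit1 '-' vn.toList).map String.ofList := by
    rw [PySem.Str.splitMax?.eq_1, hdash, PySem.Chars.splitMax?.eq_1]
    simp [pvSplitOnMax_eq]
  have hpred : ∀ c : String, (PySem.Str.startswith vn (c ++ "-") || vn == c)
      = (PySem.Chars.startswith vn.toList (c.toList ++ ['-']) || decide (vn.toList = c.toList)) := by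
    intro c
    have h1 : PySem.Str.startswith vn (c ++ "-") =
        PySem.Chars.startswith vn.toList (c.toList ++ ['-']) := by
      simp [PySem.Str.startswith, String.toList_append, hdash]
    have h2 : (vn == c) = decide (vn.toList = c.toList) := by
      rcases Bool.eq_false_or_eq_true (vn == c) with h | h <;> simp_all [String.toList_inj]
    rw [h1, h2]
  cases hC : pvSplitC '-' vn.toList with
  | nil => exact absurd hC (pvSplitC_ne_nil _ _)
  | cons p0 tl =>
    cases tl with
    | nil =>
      -- no '-' in vn: every candidate test yields vn back, and both fallbacks are vn
      have ht : vn.toList = p0 := pvSplitC_singleton '-' _ _ hC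
      have hnm : '-' ∉ vn.toList := by
        intro hmem
        obtain ⟨a, b, bs, h2⟩ := pvSplitC_mem '-' vn.toList hmem
        rw [hC] at h2
        simp at h2
      have hA : (match pvCandidatos.find? (fun c => PySem.Str.startswith vn (c ++ "-") || vn == c) with
          | some c => c
          | none => ((PySem.Str.splitMax? vn "-" 1).getD []).getD 0 "") = vn := by
        have hfb : ((PySem.Str.splitMax? vn "-" 1).getD []).getD 0 "" = vn := by
          rw [hsplit1, pvSplit1_not_mem '-' vn.toList hnm]
          simp [String.ofList_toList]
        cases hf : pvCandidatos.find? (fun c => PySem.Str.startswith vn (c ++ "-") || vn == c) with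
        | none => exact hfb
        | some c =>
          have hp := List.find?_some hf
          show c = vn
          rw [hpred c] at hp
          simp only [Bool.or_eq_true, decide_eq_true_eq] at hp
          rcases hp with hsw | heq
          · rw [PySem.Chars.startswith_iff] at hsw
            obtain ⟨z, hz⟩ := hsw
            exact absurd (by rw [← hz]; simp) hnm
          · exact (String.toList_inj.mp heq).symm
      rw [hA, hsplitC, hC]
      have hvn : String.ofList p0 = vn := by rw [← ht, String.ofList_toList]
      have hnotmem : PySem.Str.join "-" ([String.ofList p0].take 2) ∉ pvDosPalabras := by
        rw [show ([String.ofList p0].take 2) = [String.ofList p0] from rfl]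
        rw [show PySem.Str.join "-" [String.ofList p0] = String.ofList p0 from by
          simp [PySem.Str.join, PySem.Chars.join_singleton, String.toList_ofList]]
        rw [hvn]
        intro hmem
        apply hnm
        simp only [pvDosPalabras, List.mem_cons, List.not_mem_nil, or_false] at hmem
        rcases hmem with h | h | h
        · rw [h]; decide
        · rw [h]; decide
        · rw [h]; decide
      rw [List.map_cons, List.map_nil, if_neg hnotmem]
      simp [hvn]
    | cons p1 ps =>
      obtain ⟨r, htr, hcr, hnp0⟩ := pvSplitC_cons_cons '-' vn.toList p0 p1 ps hC
      have hce : ("configuracion-empresa".toList : List Char) =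
          "configuracion".toList ++ '-' :: "empresa".toList := by decide
      have hcf : ("configuracion-facturacion".toList : List Char) =
          "configuracion".toList ++ '-' :: "facturacion".toList := by decide
      have hot : ("orden-taller".toList : List Char) =
          "orden".toList ++ '-' :: "taller".toList := by decide
      have hkey2 : ∀ (x y : List Char), '-' ∉ x → '-' ∉ y →
          ((PySem.Chars.startswith vn.toList ((x ++ '-' :: y) ++ ['-'])
              || decide (vn.toList = x ++ '-' :: y)) = true
            ↔ p0 ++ '-' :: p1 = x ++ '-' :: y) := by
        intro x y hx hy
        rw [pvPred_two vn.toList p0 p1 ps x y hx hy hC]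
        constructor
        · rintro ⟨rfl, rfl⟩; rfl
        · intro h; exact pvNoSep_unique '-' p0 x p1 y hnp0 hx h
      have hkey1 : ∀ (c : List Char), '-' ∉ c →
          ((PySem.Chars.startswith vn.toList (c ++ ['-']) || decide (vn.toList = c)) = true
            ↔ p0 = c) := fun c hc => pvPred_one vn.toList p0 p1 ps c hc hC
      -- the two-segment prefix computed by B
      have htwo : PySem.Str.join "-" ((((pvSplitC '-' vn.toList).map String.ofList).take 2)) =
          String.ofList (p0 ++ '-' :: p1) := by
        rw [hC]
        simp only [List.map_cons, List.take_succ_cons, List.take_zero]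
        rw [show PySem.Str.join "-" [String.ofList p0, String.ofList p1] =
            String.ofList (p0 ++ '-' :: p1) from by
          simp [PySem.Str.join, PySem.Chars.join_cons_cons, PySem.Chars.join_singleton,
            String.toList_ofList, hdash]]
      rw [hsplitC, htwo]
      by_cases h1 : p0 ++ '-' :: p1 = "configuracion-empresa".toList
      · have hmem : String.ofList (p0 ++ '-' :: p1) ∈ pvDosPalabras := by
          rw [(pvOfList_eq_iff _ _).mpr h1]
          simp [pvDosPalabras]
        rw [if_pos hmem]
        have hfind : pvCandidatos.find?
            (fun c => PySem.Str.startswith vn (c ++ "-") || vn == c) = some "configuracion-empresa" := by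
          simp only [pvCandidatos]
          apply List.find?_cons_of_pos
          show (PySem.Str.startswith vn ("configuracion-empresa" ++ "-")
            || vn == "configuracion-empresa") = true
          rw [hpred, hce]
          exact (hkey2 _ _ (by decide) (by decide)).mpr h1
        rw [hfind]
        exact ((pvOfList_eq_iff _ _).mpr h1).symm
      · have hne1 : ¬ ((PySem.Str.startswith vn ("configuracion-empresa" ++ "-")
            || vn == "configuracion-empresa") = true) := by
          intro hp
          rw [hpred, hce] at hp
          exact h1 ((hkey2 _ _ (by decide) (by decide)).mp hp)
        by_cases h2 : p0 ++ '-' :: p1 = "configuracion-facturacion".toList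
        · have hmem : String.ofList (p0 ++ '-' :: p1) ∈ pvDosPalabras := by
            rw [(pvOfList_eq_iff _ _).mpr h2]
            simp [pvDosPalabras]
          rw [if_pos hmem]
          have hfind : pvCandidatos.find?
              (fun c => PySem.Str.startswith vn (c ++ "-") || vn == c) = some "configuracion-facturacion" := by
            simp only [pvCandidatos]
            rw [List.find?_cons_of_neg (p := fun c => PySem.Str.startswith vn (c ++ "-") || vn == c) hne1]
            apply List.find?_cons_of_pos
            show (PySem.Str.startswith vn ("configuracion-facturacion" ++ "-")
              || vn == "configuracion-facturacion") = true
            rw [hpred, hcf]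
            exact (hkey2 _ _ (by decide) (by decide)).mpr h2
          rw [hfind]
          exact ((pvOfList_eq_iff _ _).mpr h2).symm
        · have hne2 : ¬ ((PySem.Str.startswith vn ("configuracion-facturacion" ++ "-")
              || vn == "configuracion-facturacion") = true) := by
            intro hp
            rw [hpred, hcf] at hp
            exact h2 ((hkey2 _ _ (by decide) (by decide)).mp hp)
          by_cases h3 : p0 ++ '-' :: p1 = "orden-taller".toList
          · have hmem : String.ofList (p0 ++ '-' :: p1) ∈ pvDosPalabras := by
              rw [(pvOfList_eq_iff _ _).mpr h3]
              simp [pvDosPalabras]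
            rw [if_pos hmem]
            have hfind : pvCandidatos.find?
                (fun c => PySem.Str.startswith vn (c ++ "-") || vn == c) = some "orden-taller" := by
              simp only [pvCandidatos]
              rw [List.find?_cons_of_neg (p := fun c => PySem.Str.startswith vn (c ++ "-") || vn == c) hne1,
                  List.find?_cons_of_neg (p := fun c => PySem.Str.startswith vn (c ++ "-") || vn == c) hne2]
              apply List.find?_cons_of_pos
              show (PySem.Str.startswith vn ("orden-taller" ++ "-")
                || vn == "orden-taller") = true
              rw [hpred, hot]
              exact (hkey2 _ _ (by decide) (by decide)).mpr h3
            rw [hfind]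
            exact ((pvOfList_eq_iff _ _).mpr h3).symm
          · -- no two-segment slug matches: both sides return the first segment
            have hnotmem : String.ofList (p0 ++ '-' :: p1) ∉ pvDosPalabras := by
              intro hmem
              simp only [pvDosPalabras, List.mem_cons, List.not_mem_nil, or_false] at hmem
              rcases hmem with h | h | h
              · exact h1 ((pvOfList_eq_iff _ _).mp h)
              · exact h2 ((pvOfList_eq_iff _ _).mp h)
              · exact h3 ((pvOfList_eq_iff _ _).mp h)
            rw [if_neg hnotmem]
            have hB : (((pvSplitC '-' vn.toList).map String.ofList).getD 0 "") = String.ofList p0 := by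
              rw [hC]; rfl
            rw [hB]
            have hfb : ((PySem.Str.splitMax? vn "-" 1).getD []).getD 0 "" = String.ofList p0 := by
              rw [hsplit1]
              cases hS1 : pvSplit1 '-' vn.toList with
              | nil => exact absurd hS1 (pvSplit1_ne_nil _ _)
              | cons q qs =>
                have hq : q = p0 := by
                  have hh := pvHead_eq '-' vn.toList
                  rw [hS1, hC] at hh
                  simpa using hh
                simp [hq]
            cases hf : pvCandidatos.find? (fun c => PySem.Str.startswith vn (c ++ "-") || vn == c) with
            | none => exact hfb
            | some c =>
            have hc := List.mem_of_find?_eq_some hf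
            have hp := List.find?_some hf
            show c = String.ofList p0
            rw [hpred c] at hp
            simp only [pvCandidatos, List.mem_cons, List.not_mem_nil, or_false] at hc
            rcases hc with rfl | rfl | rfl | rfl | rfl | rfl | rfl | rfl | rfl | rfl | rfl | rfl | rfl | rfl <;>
              first
                | (rw [hce] at hp; exact absurd ((hkey2 _ _ (by decide) (by decide)).mp hp) h1)
                | (rw [hcf] at hp; exact absurd ((hkey2 _ _ (by decide) (by decide)).mp hp) h2)
                | (rw [hot] at hp; exact absurd ((hkey2 _ _ (by decide) (by decide)).mp hp) h3)
                | (exact ((pvOfList_eq_iff p0 _).mpr ((hkey1 _ (by decide)).mp hp)).symm)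
-- ===== VERDICT (by name: the statement is the Claim_ definition above) =====
theorem get_modelo_slug_py_spec : Claim_equal_get_modelo_slug_py := by
  intro s _
  unfold Spec_get_modelo_slug_py
  by_cases hs : s = ""
  · simp [get_modelo_slug_py, get_modelo_slug_py_alt, hs]
  · simp only [get_modelo_slug_py, get_modelo_slug_py_alt, if_neg hs]
    rw [← pvColon_eq s]
    generalize (if PySem.Str.isIn ":" s then ((PySem.Str.splitMax? s ":" 1).getD []).getD 1 "" else s) = vn
    exact pvCore_eq vn
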